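-- pv_equiv track=rewrite | github.com/safecorners/algorithms-with-python | src/baekjoon/p14453.py | maximize_winning
-- ===== SOURCE A (Python) =====
-- def maximize_winning(n: int, gestures: list[str]) -> int:
--     gestures = [""] + gestures + [""]
--
--     prefix: dict[str, list[int]] = {
--         "P": [0] * len(gestures),
--         "H": [0] * len(gestures),
--         "S": [0] * len(gestures),
--     }
--
--     suffix: dict[str, list[int]] = {
--         "P": [0] * len(gestures),
--         "H": [0] * len(gestures),
--         "S": [0] * len(gestures),
--     }
--
--     for i in range(1, len(gestures)):
--         prefix["P"][i] = prefix["P"][i - 1] + (1 if gestures[i] == "P" else 0)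
--         prefix["H"][i] = prefix["H"][i - 1] + (1 if gestures[i] == "H" else 0)
--         prefix["S"][i] = prefix["S"][i - 1] + (1 if gestures[i] == "S" else 0)
--
--     for i in range(len(gestures) - 2, 0, -1):
--         suffix["P"][i] = suffix["P"][i + 1] + (1 if gestures[i] == "P" else 0)
--         suffix["H"][i] = suffix["H"][i + 1] + (1 if gestures[i] == "H" else 0)
--         suffix["S"][i] = suffix["S"][i + 1] + (1 if gestures[i] == "S" else 0)
--
--     wins = [0] * len(gestures)
--
--     for i in range(1, len(gestures) - 1):
--         prefix_max = max(
--             prefix["P"][i],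
--             prefix["H"][i],
--             prefix["S"][i],
--         )
--
--         suffix_max = max(
--             suffix["P"][i + 1],
--             suffix["H"][i + 1],
--             suffix["S"][i + 1],
--         )
--
--         wins[i] = prefix_max + suffix_max
--
--     return max(wins)
-- ===== SOURCE B (Python) =====
-- def maximize_winning(n: int, gestures: list[str]) -> int:
--     total_p = gestures.count("P")
--     total_h = gestures.count("H")
--     total_s = gestures.count("S")
--     p = h = s = 0
--     best = 0
--     for g in gestures:
--         p += 1 if g == "P" else 0
--         h += 1 if g == "H" else 0
--         s += 1 if g == "S" else 0
--         cand = max(p, h, s) + max(total_p - p, total_h - h, total_s - s)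
--         best = max(best, cand)
--     return best
-- ===== Notes on version B (the rewrite author's own statement) =====
-- stated objective: simpler
-- what changed: Replaces the three padded prefix/suffix/wins arrays and three index loops with one forward pass keeping three running counters, deriving suffix counts as total-minus-prefix and a running maximum initialized to 0.
import Mathlib
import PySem

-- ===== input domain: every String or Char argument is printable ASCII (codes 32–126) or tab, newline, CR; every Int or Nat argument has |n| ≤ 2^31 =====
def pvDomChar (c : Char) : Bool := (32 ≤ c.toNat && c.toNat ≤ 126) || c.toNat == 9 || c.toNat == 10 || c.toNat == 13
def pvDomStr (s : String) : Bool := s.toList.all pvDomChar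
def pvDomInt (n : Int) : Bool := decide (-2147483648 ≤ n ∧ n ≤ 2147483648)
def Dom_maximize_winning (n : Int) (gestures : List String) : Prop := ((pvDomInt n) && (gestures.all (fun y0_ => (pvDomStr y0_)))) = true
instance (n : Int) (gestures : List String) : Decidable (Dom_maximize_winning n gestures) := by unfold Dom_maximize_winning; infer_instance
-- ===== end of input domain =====

-- B replaces A's padded prefix/suffix/wins arrays (three loops) by a single counting pass
-- deriving suffix counts as total-minus-prefix; objective: simpler, O(1) extra space.


-- ===== PORT A =====
-- A's prefix/suffix dicts have the three fixed literal string keys "P","H","S"; each dict is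
-- represented as a triple of lists (P-list, H-list, S-list) — exact, the keys are static and
-- distinct.  The three analogous assignments in each loop body are one helper applied at the
-- three gesture letters.  All list indices A uses are in range, so pySetD/pyGetD are exact.

-- prefix["c"][i] = prefix["c"][i-1] + (1 if gestures[i] == "c" else 0)
def pvPreStep (gs : List String) (c : String) (p : List Int) (i : Int) : List Int :=
  PySem.List.pySetD p i
    (PySem.List.pyGetD p (i - 1) 0 + (if PySem.List.pyGetD gs i "" = c then 1 else 0))

-- suffix["c"][i] = suffix["c"][i+1] + (1 if gestures[i] == "c" else 0)
def pvSufStep (gs : List String) (c : String) (p : List Int) (i : Int) : List Int :=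
  PySem.List.pySetD p i
    (PySem.List.pyGetD p (i + 1) 0 + (if PySem.List.pyGetD gs i "" = c then 1 else 0))

-- wins[i] = prefix_max + suffix_max
def pvWinVal (pre suf : List Int × List Int × List Int) (i : Int) : Int :=
  (max (PySem.List.pyGetD pre.1 i 0)
    (max (PySem.List.pyGetD pre.2.1 i 0) (PySem.List.pyGetD pre.2.2 i 0))) +
  (max (PySem.List.pyGetD suf.1 (i + 1) 0)
    (max (PySem.List.pyGetD suf.2.1 (i + 1) 0) (PySem.List.pyGetD suf.2.2 (i + 1) 0)))

def maximize_winning (n : Int) (gestures : List String) : Int :=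
  let gs : List String := [""] ++ gestures ++ [""]
  let z : List Int := List.replicate gs.length 0
  let pre : List Int × List Int × List Int :=
    (PySem.List.pyRange 1 (gs.length : Int) 1).foldl
      (fun p i => (pvPreStep gs "P" p.1 i, pvPreStep gs "H" p.2.1 i, pvPreStep gs "S" p.2.2 i))
      (z, z, z)
  let suf : List Int × List Int × List Int :=
    (PySem.List.pyRange ((gs.length : Int) - 2) 0 (-1)).foldl
      (fun s i => (pvSufStep gs "P" s.1 i, pvSufStep gs "H" s.2.1 i, pvSufStep gs "S" s.2.2 i))
      (z, z, z)
  let wins : List Int :=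
    (PySem.List.pyRange 1 ((gs.length : Int) - 1) 1).foldl
      (fun w i => PySem.List.pySetD w i (pvWinVal pre suf i)) z
  -- max(wins): wins always has length ≥ 2, so the none branch is unreachable
  match PySem.List.max? wins (fun x => x) with
  | some v => v
  | none => 0

-- ===== PORT B =====
-- one loop iteration: bump the three running counters, form the candidate, keep the best
def pvBStep (tp th ts : Int) (st : Int × Int × Int × Int) (g : String) : Int × Int × Int × Int :=
  let p := st.1 + (if g = "P" then 1 else 0)
  let h := st.2.1 + (if g = "H" then 1 else 0)
  let s := st.2.2.1 + (if g = "S" then 1 else 0)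
  let cand := max p (max h s) + max (tp - p) (max (th - h) (ts - s))
  (p, h, s, max st.2.2.2 cand)

def maximize_winning_alt (n : Int) (gestures : List String) : Int :=
  let total_p : Int := PySem.List.count gestures "P"
  let total_h : Int := PySem.List.count gestures "H"
  let total_s : Int := PySem.List.count gestures "S"
  (gestures.foldl (pvBStep total_p total_h total_s) (0, 0, 0, 0)).2.2.2

-- ===== PRECONDITION & SPEC =====
def Spec_maximize_winning (n : Int) (gestures : List String) (out : Int) : Prop := out = maximize_winning_alt n gestures
instance (n : Int) (gestures : List String) (out : Int) : Decidable (Spec_maximize_winning n gestures out) := by unfold Spec_maximize_winning; infer_instance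

-- ===== CLAIM (what is proved, stated in full; the proofs are below) =====
def Claim_equal_maximize_winning : Prop := ∀ (n : Int) (gestures : List String), Dom_maximize_winning n gestures → Spec_maximize_winning n gestures (maximize_winning n gestures)

-- ===== LEMMAS AND PROOFS =====

-- Int-valued count of a gesture in a list
def pvCnt (c : String) (l : List String) : Int := (l.count c : Int)

-- the winnings for the split after position j (1-based), prefix/suffix form
def pvW (full : List String) (j : Nat) : Int :=
  max (pvCnt "P" (full.take j)) (max (pvCnt "H" (full.take j)) (pvCnt "S" (full.take j))) +
  max (pvCnt "P" (full.drop j)) (max (pvCnt "H" (full.drop j)) (pvCnt "S" (full.drop j)))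

-- the same quantity, suffix derived as total minus prefix (B's form)
def pvWB (full : List String) (j : Nat) : Int :=
  max (pvCnt "P" (full.take j)) (max (pvCnt "H" (full.take j)) (pvCnt "S" (full.take j))) +
  max (pvCnt "P" full - pvCnt "P" (full.take j))
    (max (pvCnt "H" full - pvCnt "H" (full.take j)) (pvCnt "S" full - pvCnt "S" (full.take j)))

theorem pvCnt_sub (c : String) (full : List String) (j : Nat) :
    pvCnt c full - pvCnt c (full.take j) = pvCnt c (full.drop j) := by
  unfold pvCnt
  rw [← List.take_append_drop j full, List.count_append]
  push_cast
  simp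

theorem pvW_eq_pvWB (full : List String) (j : Nat) : pvW full j = pvWB full j := by
  unfold pvW pvWB
  rw [pvCnt_sub "P" full j, pvCnt_sub "H" full j, pvCnt_sub "S" full j]

-- a fold over a triple whose components evolve independently is a triple of folds
theorem pvFoldlTriple {α β γ δ : Type} (f : α → δ → α) (g : β → δ → β) (h : γ → δ → γ)
    (xs : List δ) (a : α) (b : β) (c : γ) :
    xs.foldl (fun p x => (f p.1 x, g p.2.1 x, h p.2.2 x)) (a, b, c) =
      (xs.foldl f a, xs.foldl g b, xs.foldl h c) := by
  induction xs generalizing a b c with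
  | nil => rfl
  | cons x t ih => simpa using ih (f a x) (g b x) (h c x)

theorem pvGetD_replicate (len i : Nat) : (List.replicate len (0 : Int)).getD i 0 = 0 := by
  simp [List.getD_eq_getElem?_getD, List.getElem?_replicate]
  split <;> rfl

-- A's prefix loop: after processing indices 1..k, entry i holds the count of c among gs[1..i]
theorem pvPreFold (gs : List String) (c : String) (k : Nat) (hk : k < gs.length) :
    ((PySem.List.pyRange 1 ((k : Int) + 1) 1).foldl (pvPreStep gs c)
        (List.replicate gs.length 0)).length = gs.length ∧
      ∀ i : Nat, ((PySem.List.pyRange 1 ((k : Int) + 1) 1).foldl (pvPreStep gs c)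
          (List.replicate gs.length 0)).getD i 0 =
        if 1 ≤ i ∧ i ≤ k then pvCnt c ((gs.drop 1).take i) else 0 := by
  induction k with
  | zero =>
    rw [PySem.List.pyRange_one_eq_nil (by omega)]
    constructor
    · simp
    · intro i
      rw [if_neg (by omega)]
      simp [List.getD_eq_getElem?_getD, List.getElem?_replicate]
      split <;> rfl
  | succ k ih =>
    obtain ⟨hlen, hget⟩ := ih (by omega)
    have hsplit : PySem.List.pyRange 1 ((k : Int) + 1 + 1) 1
        = PySem.List.pyRange 1 ((k : Int) + 1) 1 ++ [(k : Int) + 1] := by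
      have := PySem.List.pyRange_one_succ_right (a := 1) (b := (k : Int) + 1) (by omega)
      simpa using this
    push_cast
    rw [hsplit, List.foldl_append]
    set prev := (PySem.List.pyRange 1 ((k : Int) + 1) 1).foldl (pvPreStep gs c)
      (List.replicate gs.length 0) with hprev
    -- the value written at k+1
    have hkcast : ((k : Int) + 1) = ((k + 1 : Nat) : Int) := by push_cast; ring
    have hread : PySem.List.pyGetD prev ((k : Int) + 1 - 1) 0 = pvCnt c ((gs.drop 1).take k) := by
      have : ((k : Int) + 1 - 1) = ((k : Nat) : Int) := by ring
      rw [this, PySem.List.pyGetD_natCast, hget k]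
      by_cases h1 : 1 ≤ k
      · rw [if_pos ⟨h1, le_refl k⟩]
      · have : k = 0 := by omega
        subst this; simp [pvCnt]
    have hgs : PySem.List.pyGetD gs ((k : Int) + 1) "" = gs[k + 1]'(by omega) := by
      rw [hkcast, PySem.List.pyGetD_natCast]
      exact List.getD_eq_getElem _ _ (by omega)
    have hcnt : pvCnt c ((gs.drop 1).take (k + 1))
        = pvCnt c ((gs.drop 1).take k) + (if gs[k + 1]'(by omega) = c then 1 else 0) := by
      have hlt : k < (gs.drop 1).length := by simp; omega
      rw [List.take_add_one, List.getElem?_eq_getElem hlt]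
      have : (gs.drop 1)[k]'hlt = gs[k + 1]'(by omega) := by
        simp
      unfold pvCnt
      rw [this, List.count_append]
      push_cast
      by_cases hgc : gs[k + 1]'(by omega) = c <;> simp [hgc]
    constructor
    · rw [List.foldl_cons, List.foldl_nil]
      unfold pvPreStep
      rw [PySem.List.length_pySetD, hlen]
    · intro i
      rw [List.foldl_cons, List.foldl_nil]
      unfold pvPreStep
      rw [hread, hgs]
      set v : Int := pvCnt c ((gs.drop 1).take k) + (if gs[k + 1]'(by omega) = c then 1 else 0) with hv
      have hset : PySem.List.pySetD prev ((k : Int) + 1) v = prev.set (k + 1) v := by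
        rw [hkcast, PySem.List.pySetD_natCast]
      rw [hset]
      by_cases hik : i = k + 1
      · subst hik
        rw [List.getD_eq_getElem _ _ (by rw [List.length_set, hlen]; omega)]
        rw [List.getElem_set_self (by simp [hlen]; omega)]
        rw [if_pos ⟨by omega, le_refl _⟩, hcnt]
      · have : (prev.set (k + 1) v).getD i 0 = prev.getD i 0 := by
          by_cases hi : i < prev.length
          · rw [List.getD_eq_getElem _ _ (by rw [List.length_set, hlen]; omega),
              List.getD_eq_getElem _ _ hi]
            exact List.getElem_set_ne (by omega) ..
          · rw [List.getD_eq_default _ _ (by rw [List.length_set, hlen]; omega),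
              List.getD_eq_default _ _ (by omega)]
        rw [this, hget i]
        by_cases h1 : 1 ≤ i ∧ i ≤ k
        · rw [if_pos h1, if_pos ⟨h1.1, by omega⟩]
        · rw [if_neg h1, if_neg (by omega)]

theorem pvS_zero (gs : List String) (c : String) (i : Nat) (h : gs.length - 1 ≤ i) :
    pvCnt c ((gs.take (gs.length - 1)).drop i) = 0 := by
  rw [List.drop_eq_nil_of_le (by simp [List.length_take]; omega)]
  rfl

-- A's suffix loop, processed downwards from index k: entry i (1 ≤ i ≤ L-2) holds the
-- count of c among gs[i..L-2]
theorem pvSufFold (gs : List String) (c : String) :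
    ∀ (k : Nat) (p : List Int), p.length = gs.length → (k : Int) ≤ (gs.length : Int) - 2 →
      (∀ i : Nat, p.getD i 0 =
        if k < i ∧ (i : Int) ≤ (gs.length : Int) - 2
          then pvCnt c ((gs.take (gs.length - 1)).drop i) else 0) →
      ((PySem.List.pyRange (k : Int) 0 (-1)).foldl (pvSufStep gs c) p).length = gs.length ∧
        ∀ i : Nat, ((PySem.List.pyRange (k : Int) 0 (-1)).foldl (pvSufStep gs c) p).getD i 0 =
          if 1 ≤ i ∧ (i : Int) ≤ (gs.length : Int) - 2
            then pvCnt c ((gs.take (gs.length - 1)).drop i) else 0 := by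
  intro k
  induction k with
  | zero =>
    intro p hlen hk hinv
    rw [show ((0 : Nat) : Int) = 0 from rfl, PySem.List.pyRange_neg_one_eq_nil (by omega)]
    refine ⟨hlen, fun i => ?_⟩
    rw [List.foldl_nil, hinv i]
    by_cases h1 : 1 ≤ i ∧ (i : Int) ≤ (gs.length : Int) - 2
    · rw [if_pos ⟨by omega, h1.2⟩, if_pos h1]
    · rw [if_neg (by omega), if_neg h1]
  | succ k ih =>
    intro p hlen hk hinv
    have hL : k + 3 ≤ gs.length := by omega
    have hcons : PySem.List.pyRange ((k + 1 : Nat) : Int) 0 (-1)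
        = ((k + 1 : Nat) : Int) :: PySem.List.pyRange (k : Nat) 0 (-1) := by
      rw [PySem.List.pyRange_neg_one_cons (by push_cast; omega),
        show ((k + 1 : Nat) : Int) - 1 = ((k : Nat) : Int) by push_cast; omega]
    rw [hcons, List.foldl_cons]
    -- the value written at k+1
    have hread : PySem.List.pyGetD p (((k + 1 : Nat) : Int) + 1) 0
        = pvCnt c ((gs.take (gs.length - 1)).drop (k + 2)) := by
      rw [show (((k + 1 : Nat) : Int) + 1) = ((k + 2 : Nat) : Int) by push_cast; omega,
        PySem.List.pyGetD_natCast, hinv (k + 2)]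
      by_cases h2 : ((k + 2 : Nat) : Int) ≤ (gs.length : Int) - 2
      · rw [if_pos ⟨by omega, h2⟩]
      · rw [if_neg (by push_cast at h2 ⊢; omega), pvS_zero gs c (k + 2) (by omega)]
    have hgs : PySem.List.pyGetD gs ((k + 1 : Nat) : Int) "" = gs[k + 1]'(by omega) := by
      rw [PySem.List.pyGetD_natCast]
      exact List.getD_eq_getElem _ _ (by omega)
    have hcnt : pvCnt c ((gs.take (gs.length - 1)).drop (k + 1))
        = pvCnt c ((gs.take (gs.length - 1)).drop (k + 2)) + (if gs[k + 1]'(by omega) = c then 1 else 0) := by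
      have hlt : k + 1 < (gs.take (gs.length - 1)).length := by
        simp [List.length_take]; omega
      rw [List.drop_eq_getElem_cons hlt]
      have hel : (gs.take (gs.length - 1))[k + 1]'hlt = gs[k + 1]'(by omega) := by
        simp [List.getElem_take]
      unfold pvCnt
      rw [hel, List.count_cons]
      push_cast
      by_cases hgc : gs[k + 1]'(by omega) = c <;> simp [hgc]
    have hstep : pvSufStep gs c p ((k + 1 : Nat) : Int)
        = p.set (k + 1) (pvCnt c ((gs.take (gs.length - 1)).drop (k + 1))) := by
      unfold pvSufStep
      rw [hread, hgs, PySem.List.pySetD_natCast, hcnt]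
    rw [hstep]
    refine ih _ (by rw [List.length_set, hlen]) (by omega) ?_
    intro i
    by_cases hik : i = k + 1
    · subst hik
      rw [List.getD_eq_getElem _ _ (by rw [List.length_set, hlen]; omega),
        List.getElem_set_self (by simp [hlen]; omega)]
      rw [if_pos ⟨by omega, by push_cast; omega⟩]
    · have heq : (p.set (k + 1) (pvCnt c ((gs.take (gs.length - 1)).drop (k + 1)))).getD i 0 = p.getD i 0 := by
        by_cases hi : i < p.length
        · rw [List.getD_eq_getElem _ _ (by rw [List.length_set]; omega),
            List.getD_eq_getElem _ _ hi]
          exact List.getElem_set_ne (by omega) ..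
        · rw [List.getD_eq_default _ _ (by rw [List.length_set]; omega),
            List.getD_eq_default _ _ (by omega)]
      rw [heq, hinv i]
      by_cases h1 : k + 1 < i ∧ (i : Int) ≤ (gs.length : Int) - 2
      · rw [if_pos h1, if_pos ⟨by omega, h1.2⟩]
      · rw [if_neg h1, if_neg (by omega)]

-- A's wins loop: a pure store loop
theorem pvSetLoop (len : Nat) (V : Int → Int) (k : Nat) (hk : k < len) :
    ((PySem.List.pyRange 1 ((k : Int) + 1) 1).foldl
        (fun w i => PySem.List.pySetD w i (V i)) (List.replicate len (0 : Int))).length = len ∧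
      ∀ i : Nat, ((PySem.List.pyRange 1 ((k : Int) + 1) 1).foldl
          (fun w i => PySem.List.pySetD w i (V i)) (List.replicate len (0 : Int))).getD i 0 =
        if 1 ≤ i ∧ i ≤ k then V i else 0 := by
  induction k with
  | zero =>
    rw [PySem.List.pyRange_one_eq_nil (by omega)]
    refine ⟨by simp, fun i => ?_⟩
    rw [if_neg (by omega)]
    simp [List.getD_eq_getElem?_getD, List.getElem?_replicate]
    split <;> rfl
  | succ k ih =>
    obtain ⟨hlen, hget⟩ := ih (by omega)
    have hsplit : PySem.List.pyRange 1 ((k : Int) + 1 + 1) 1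
        = PySem.List.pyRange 1 ((k : Int) + 1) 1 ++ [(k : Int) + 1] := by
      simpa using PySem.List.pyRange_one_succ_right (a := 1) (b := (k : Int) + 1) (by omega)
    push_cast
    rw [hsplit, List.foldl_append, List.foldl_cons, List.foldl_nil]
    set prev := (PySem.List.pyRange 1 ((k : Int) + 1) 1).foldl
      (fun w i => PySem.List.pySetD w i (V i)) (List.replicate len (0 : Int)) with hprev
    have hset : PySem.List.pySetD prev ((k : Int) + 1) (V ((k : Int) + 1))
        = prev.set (k + 1) (V ((k : Int) + 1)) := by
      rw [show ((k : Int) + 1) = ((k + 1 : Nat) : Int) by push_cast; omega,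
        PySem.List.pySetD_natCast]
    rw [hset]
    refine ⟨by rw [List.length_set, hlen], fun i => ?_⟩
    by_cases hik : i = k + 1
    · subst hik
      rw [List.getD_eq_getElem _ _ (by rw [List.length_set, hlen]; omega),
        List.getElem_set_self (by simp [hlen]; omega), if_pos ⟨by omega, le_refl _⟩]
      norm_num
    · have heq : (prev.set (k + 1) (V ((k : Int) + 1))).getD i 0 = prev.getD i 0 := by
        by_cases hi : i < prev.length
        · rw [List.getD_eq_getElem _ _ (by rw [List.length_set]; omega),
            List.getD_eq_getElem _ _ hi]
          exact List.getElem_set_ne (by omega) ..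
        · rw [List.getD_eq_default _ _ (by rw [List.length_set]; omega),
            List.getD_eq_default _ _ (by omega)]
      rw [heq, hget i]
      by_cases h1 : 1 ≤ i ∧ i ≤ k
      · rw [if_pos h1, if_pos ⟨h1.1, by omega⟩]
      · rw [if_neg h1, if_neg (by omega)]

theorem pvA_eq (n : Int) (gestures : List String) :
    maximize_winning n gestures =
      ((List.range' 1 gestures.length).map (pvW gestures)).foldl max 0 := by
  simp only [maximize_winning]
  set gs : List String := [""] ++ gestures ++ [""] with hgs
  set m := gestures.length with hm
  have hgsl : gs.length = m + 2 := by simp [hgs, hm]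
  rw [show ((gs.length : Int)) = ((m + 1 : Nat) : Int) + 1 by rw [hgsl]; push_cast; ring]
  rw [show (((m + 1 : Nat) : Int) + 1) - 2 = ((m : Nat) : Int) by push_cast; ring]
  rw [show (((m + 1 : Nat) : Int) + 1) - 1 = ((m : Nat) : Int) + 1 by push_cast; ring]
  rw [pvFoldlTriple (pvPreStep gs "P") (pvPreStep gs "H") (pvPreStep gs "S"),
    pvFoldlTriple (pvSufStep gs "P") (pvSufStep gs "H") (pvSufStep gs "S")]
  obtain ⟨hPl, hPg⟩ := pvPreFold gs "P" (m + 1) (by omega)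
  obtain ⟨hHl, hHg⟩ := pvPreFold gs "H" (m + 1) (by omega)
  obtain ⟨hSl, hSg⟩ := pvPreFold gs "S" (m + 1) (by omega)
  have hinv0 : ∀ c : String, ∀ i : Nat, (List.replicate gs.length (0 : Int)).getD i 0 =
      if m < i ∧ (i : Int) ≤ (gs.length : Int) - 2
        then pvCnt c ((gs.take (gs.length - 1)).drop i) else 0 := by
    intro c i
    rw [pvGetD_replicate, if_neg (by rw [hgsl]; push_cast; omega)]
  obtain ⟨hPsl, hPsg⟩ := pvSufFold gs "P" m (List.replicate gs.length 0)
    (by simp) (by rw [hgsl]; push_cast; omega) (hinv0 "P")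
  obtain ⟨hHsl, hHsg⟩ := pvSufFold gs "H" m (List.replicate gs.length 0)
    (by simp) (by rw [hgsl]; push_cast; omega) (hinv0 "H")
  obtain ⟨hSsl, hSsg⟩ := pvSufFold gs "S" m (List.replicate gs.length 0)
    (by simp) (by rw [hgsl]; push_cast; omega) (hinv0 "S")
  set preP := (PySem.List.pyRange 1 (((m + 1 : Nat) : Int) + 1) 1).foldl (pvPreStep gs "P")
    (List.replicate gs.length 0) with hpreP
  set preH := (PySem.List.pyRange 1 (((m + 1 : Nat) : Int) + 1) 1).foldl (pvPreStep gs "H")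
    (List.replicate gs.length 0) with hpreH
  set preS := (PySem.List.pyRange 1 (((m + 1 : Nat) : Int) + 1) 1).foldl (pvPreStep gs "S")
    (List.replicate gs.length 0) with hpreS
  set sufP := (PySem.List.pyRange ((m : Nat) : Int) 0 (-1)).foldl (pvSufStep gs "P")
    (List.replicate gs.length 0) with hsufP
  set sufH := (PySem.List.pyRange ((m : Nat) : Int) 0 (-1)).foldl (pvSufStep gs "H")
    (List.replicate gs.length 0) with hsufH
  set sufS := (PySem.List.pyRange ((m : Nat) : Int) 0 (-1)).foldl (pvSufStep gs "S")
    (List.replicate gs.length 0) with hsufS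
  obtain ⟨hWl, hWg⟩ := pvSetLoop gs.length (pvWinVal (preP, preH, preS) (sufP, sufH, sufS))
    m (by omega)
  -- translation of the padded counts to counts over the raw gesture list
  have htake : ∀ i : Nat, i ≤ m → (gs.drop 1).take i = gestures.take i := by
    intro i hi
    rw [hgs, show ([""] ++ gestures ++ [""]).drop 1 = gestures ++ [""] from rfl,
      List.take_append_of_le_length (by omega)]
  have hdrop : ∀ i : Nat, (gs.take (gs.length - 1)).drop (i + 1) = gestures.drop i := by
    intro i
    rw [hgsl, hgs, show ([""] ++ gestures ++ [""]) = "" :: (gestures ++ [""]) from rfl,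
      show m + 2 - 1 = m + 1 from rfl, List.take_succ_cons,
      List.take_append_of_le_length (by omega), hm, List.take_length, List.drop_succ_cons]
  have hval : ∀ i : Nat, 1 ≤ i → i ≤ m →
      pvWinVal (preP, preH, preS) (sufP, sufH, sufS) ((i : Nat) : Int) = pvW gestures i := by
    intro i h1 h2
    unfold pvWinVal
    have hc : ((i : Nat) : Int) + 1 = ((i + 1 : Nat) : Int) := by push_cast; ring
    simp only [hc, PySem.List.pyGetD_natCast]
    rw [hPg i, hHg i, hSg i, hPsg (i + 1), hHsg (i + 1), hSsg (i + 1)]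
    rw [if_pos ⟨h1, by omega⟩, if_pos ⟨h1, by omega⟩, if_pos ⟨h1, by omega⟩]
    have hsufval : ∀ c : String,
        (if 1 ≤ i + 1 ∧ ((i + 1 : Nat) : Int) ≤ (gs.length : Int) - 2
          then pvCnt c ((gs.take (gs.length - 1)).drop (i + 1)) else 0)
        = pvCnt c (gestures.drop i) := by
      intro c
      by_cases hc2 : ((i + 1 : Nat) : Int) ≤ (gs.length : Int) - 2
      · rw [if_pos ⟨by omega, hc2⟩, hdrop i]
      · rw [if_neg (by push_cast at hc2 ⊢; omega)]
        rw [hgsl] at hc2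
        have : gestures.drop i = [] := List.drop_eq_nil_of_le (by push_cast at hc2; omega)
        rw [this]
        rfl
    rw [hsufval "P", hsufval "H", hsufval "S", htake i h2]
    rfl
  -- the wins array, written out
  set winsT := (PySem.List.pyRange 1 (((m : Nat) : Int) + 1) 1).foldl
    (fun w i => PySem.List.pySetD w i (pvWinVal (preP, preH, preS) (sufP, sufH, sufS) i))
    (List.replicate gs.length 0) with hwinsT
  have hwins : winsT = 0 :: ((List.range' 1 m).map (pvW gestures) ++ [0]) := by
    apply List.ext_getElem
    · rw [hWl, hgsl]; simp
    · intro i h1 h2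
      rw [show winsT[i]'h1 = winsT.getD i 0 from (List.getD_eq_getElem _ _ h1).symm, hWg i]
      rw [hWl, hgsl] at h1
      match i with
      | 0 => rw [if_neg (by omega)]; rfl
      | j + 1 =>
        rw [List.getElem_cons_succ]
        by_cases hj : j < m
        · rw [List.getElem_append_left (by simp; omega), List.getElem_map,
            List.getElem_range', if_pos ⟨by omega, by omega⟩, hval (j + 1) (by omega) (by omega)]
          congr 1; omega
        · have hjm : j = m := by omega
          subst hjm
          rw [List.getElem_append_right (by simp), if_neg (by omega)]
          simp
  rw [hwins, PySem.List.max?_id_cons]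
  show ((List.range' 1 m).map (pvW gestures) ++ [0]).foldl max 0 = _
  rw [List.foldl_append, List.foldl_cons, List.foldl_nil]
  exact max_eq_left ((PySem.List.le_foldl_max _ 0).1)

theorem pvCnt_take_succ (c : String) (full : List String) (k : Nat) (hk : k < full.length) :
    pvCnt c (full.take (k + 1)) = pvCnt c (full.take k) + (if full[k]'hk = c then 1 else 0) := by
  unfold pvCnt
  rw [List.take_add_one, List.getElem?_eq_getElem hk, List.count_append]
  push_cast
  by_cases hgc : full[k]'hk = c <;> simp [hgc]

theorem pvBFold (full : List String) :
    ∀ (l : List String) (k : Nat), full.drop k = l → ∀ b : Int,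
      l.foldl (pvBStep (pvCnt "P" full) (pvCnt "H" full) (pvCnt "S" full))
          (pvCnt "P" (full.take k), pvCnt "H" (full.take k), pvCnt "S" (full.take k), b) =
        (pvCnt "P" full, pvCnt "H" full, pvCnt "S" full,
          ((List.range' (k + 1) (full.length - k)).map (pvWB full)).foldl max b) := by
  intro l
  induction l with
  | nil =>
    intro k hdrop b
    have hle : full.length ≤ k := by
      by_contra h
      exact absurd hdrop (by simp [List.drop_eq_nil_iff]; omega)
    rw [List.take_of_length_le hle, show full.length - k = 0 by omega]
    simp
  | cons g l' ih =>
    intro k hdrop b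
    have hklt : k < full.length := by
      by_contra h
      rw [List.drop_eq_nil_of_le (by omega)] at hdrop
      exact List.cons_ne_nil g l' hdrop.symm
    have hcons : g :: l' = full[k]'hklt :: full.drop (k + 1) := by
      rw [← hdrop, List.drop_eq_getElem_cons hklt]
    have hg : g = full[k]'hklt := (List.cons_eq_cons.mp hcons).1
    have hl' : full.drop (k + 1) = l' := ((List.cons_eq_cons.mp hcons).2).symm
    rw [List.foldl_cons]
    have hstep : pvBStep (pvCnt "P" full) (pvCnt "H" full) (pvCnt "S" full)
        (pvCnt "P" (full.take k), pvCnt "H" (full.take k), pvCnt "S" (full.take k), b) g =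
        (pvCnt "P" (full.take (k + 1)), pvCnt "H" (full.take (k + 1)),
          pvCnt "S" (full.take (k + 1)), max b (pvWB full (k + 1))) := by
      unfold pvBStep pvWB
      rw [pvCnt_take_succ "P" full k hklt, pvCnt_take_succ "H" full k hklt,
        pvCnt_take_succ "S" full k hklt, hg]
    rw [hstep, ih (k + 1) hl' (max b (pvWB full (k + 1)))]
    have hn : full.length - k = (full.length - (k + 1)) + 1 := by omega
    rw [hn, List.range'_succ, List.map_cons, List.foldl_cons]

theorem pvB_eq (n : Int) (gestures : List String) :
    maximize_winning_alt n gestures =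
      ((List.range' 1 gestures.length).map (pvWB gestures)).foldl max 0 := by
  unfold maximize_winning_alt
  simp only [PySem.List.count_eq]
  rw [show pvBStep (gestures.count "P" : Int) (gestures.count "H" : Int) (gestures.count "S" : Int)
      = pvBStep (pvCnt "P" gestures) (pvCnt "H" gestures) (pvCnt "S" gestures) from rfl,
    show ((0, 0, 0, 0) : Int × Int × Int × Int)
      = (pvCnt "P" (gestures.take 0), pvCnt "H" (gestures.take 0),
        pvCnt "S" (gestures.take 0), 0) from rfl,
    pvBFold gestures gestures 0 rfl 0]
  simp

-- ===== VERDICT (by name: the statement is the Claim_ definition above) =====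
theorem maximize_winning_spec : Claim_equal_maximize_winning := by
  intro n gestures _
  unfold Spec_maximize_winning
  rw [pvA_eq, pvB_eq]
  have : pvW gestures = pvWB gestures := funext (pvW_eq_pvWB gestures)
  rw [this]
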